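-- pv_equiv track=rewrite | github.com/nugumanov03/pyt-2att | homeworks/hw6/e.py | count_10_friendly
-- ===== SOURCE A (Python) =====
-- MOD = 1000000007
--
-- def count_10_friendly(num):
--     num_str = str(num)
--     n = len(num_str)
--
--     # Memoization for DP states
--     dp = {}
--
--     # Recursive function with memoization
--     def dfs(pos, sum, tight, valid):
--         # Base case: Reached the end
--         if pos == n:
--             return 1 if valid else 0
--
--         # Memoization key
--         state = (pos, sum, tight, valid)
--         if state in dp:
--             return dp[state]
--
--         # Limits for the current digit (0 to 9 if not tight, else 0 to digit[pos])
--         limit = int(num_str[pos]) if tight else 9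
--
--         # Total count of valid numbers
--         count = 0
--         for digit in range(0, limit + 1):
--             # Update the sum and validity based on the current digit
--             new_sum = (sum + digit) % 10
--             new_valid = valid or (new_sum == 0 and sum != 0)
--             count += dfs(pos + 1, new_sum, tight and (digit == limit), new_valid)
--             count %= MOD
--
--         dp[state] = count
--         return count
--
--     # Start DFS with the initial state
--     return dfs(0, 0, True, False)
-- ===== SOURCE B (Python) =====
-- MOD = 1000000007
--
-- def _suffix_count(d, table, s, t, v):
--     # count of valid completions when the current digit slot sees state (s, t, v)
--     limit = d if t else 9
--     c = 0
--     for dig in range(limit + 1):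
--         ns = (s + dig) % 10
--         nv = v or (ns == 0 and s != 0)
--         c = (c + table[(ns, t and dig == limit, nv)]) % MOD
--     return c
--
-- def count_10_friendly(num):
--     # Bottom-up tabulation over suffixes: table[(sum, tight, valid)] = number of
--     # valid completions of the remaining digits. Processes digits right-to-left.
--     digits = [int(c) for c in str(num)]
--     table = {(s, t, v): (1 if v else 0)
--              for s in range(10) for t in (False, True) for v in (False, True)}
--     for d in reversed(digits):
--         table = {(s, t, v): _suffix_count(d, table, s, t, v)
--                  for s in range(10) for t in (False, True) for v in (False, True)}
--     return table[(0, True, False)]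
-- ===== Notes on version B (the rewrite author's own statement) =====
-- stated objective: alternative
-- what changed: Replaced the top-down recursive digit DP with a memoization dict by a bottom-up tabulation that processes the digits right-to-left, maintaining an explicit 40-entry table from (sum, tight, valid) to the count of valid completions.
import Mathlib
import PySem

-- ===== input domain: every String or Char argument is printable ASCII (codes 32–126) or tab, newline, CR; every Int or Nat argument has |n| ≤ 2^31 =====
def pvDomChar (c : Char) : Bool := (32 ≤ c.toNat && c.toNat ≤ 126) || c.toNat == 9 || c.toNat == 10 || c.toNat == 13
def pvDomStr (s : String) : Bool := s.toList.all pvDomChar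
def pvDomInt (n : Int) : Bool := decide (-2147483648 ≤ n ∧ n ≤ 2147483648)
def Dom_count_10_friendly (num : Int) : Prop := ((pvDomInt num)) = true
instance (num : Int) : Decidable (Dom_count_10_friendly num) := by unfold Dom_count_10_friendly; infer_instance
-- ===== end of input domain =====

-- B replaces A's top-down memoized recursion by a bottom-up right-to-left tabulation
-- over an explicit (sum, tight, valid) table (objective: alternative decomposition).
-- Both Pythons raise ValueError on num < 0 ('int' of the '-' character); Pre_ excludes those.

-- ===== PORT A =====
-- int(num_str[pos]) for a single character; exact on digit characters (the only ones
-- reached inside Pre_); on a non-digit Python raises ValueError, excluded by Pre_.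
def convDigit (c : Char) : Int := (PySem.Int.ofStr? (String.ofList [c])).getD 0

def pvMOD : Int := 1000000007

-- A's dfs: recursion over the remaining characters of num_str; the memoization dict
-- dp is threaded explicitly (key = (pos, sum, tight, valid) exactly as in the Python).
def dfsA : List Char → Int → Int → Bool → Bool →
    PySem.Dict (Int × Int × Bool × Bool) Int →
    Int × PySem.Dict (Int × Int × Bool × Bool) Int
  | [], _, _, _, v, dp => ((if v then 1 else 0), dp)
  | ch :: rest, pos, s, t, v, dp =>
    match dp.get? (pos, s, t, v) with
    | some c => (c, dp)
    | none =>
      let limit := if t then convDigit ch else 9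
      let r := (PySem.List.pyRange 0 (limit + 1) 1).foldl
        (fun (acc : Int × PySem.Dict (Int × Int × Bool × Bool) Int) dig =>
          let ns := (s + dig) % 10
          let nv := v || (decide (ns = 0) && decide (¬ s = 0))
          let res := dfsA rest (pos + 1) ns (t && decide (dig = limit)) nv acc.2
          ((acc.1 + res.1) % pvMOD, res.2)) (0, dp)
      (r.1, r.2.insert (pos, s, t, v) r.1)

def count_10_friendly (num : Int) : Int :=
  (dfsA (PySem.Int.toStr num).toList 0 0 true false PySem.Dict.empty).1

-- ===== PORT B =====
-- _suffix_count(d, table, s, t, v); table[...] is ported as getD _ 0: every key looked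
-- up is present (the table always carries all 40 states), so Python's KeyError never fires.
def bVal (d : Int) (table : PySem.Dict (Int × Bool × Bool) Int)
    (s : Int) (t v : Bool) : Int :=
  let limit := if t then d else 9
  (PySem.List.pyRange 0 (limit + 1) 1).foldl (fun c dig =>
    let ns := (s + dig) % 10
    let nv := v || (decide (ns = 0) && decide (¬ s = 0))
    (c + table.getD (ns, t && decide (dig = limit), nv) 0) % pvMOD) 0

-- the dict comprehensions {(s,t,v): F(s,t,v) for s in range(10) for t ... for v ...}
def bTable (F : Int → Bool → Bool → Int) : PySem.Dict (Int × Bool × Bool) Int :=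
  (PySem.List.pyRange 0 10 1).foldl (fun nt s =>
    [false, true].foldl (fun nt t =>
      [false, true].foldl (fun nt v =>
        nt.insert (s, t, v) (F s t v)) nt) nt) PySem.Dict.empty

def count_10_friendly_alt (num : Int) : Int :=
  let digits := (PySem.Int.toStr num).toList.map convDigit
  let table := digits.reverse.foldl
    (fun tb d => bTable (fun s t v => bVal d tb s t v))
    (bTable (fun _ _ v => if v then 1 else 0))
  table.getD (0, true, false) 0

-- ===== PRECONDITION & SPEC =====
-- Pre_ excludes num < 0: str(num) then starts with '-' and int('-') raises ValueError
-- in A (and likewise in B); on num ≥ 0 both return normally.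
def Pre_count_10_friendly (num : Int) : Prop := 0 ≤ num
instance (num : Int) : Decidable (Pre_count_10_friendly num) := by
  unfold Pre_count_10_friendly; infer_instance

def pvWitness_count_10_friendly : Int := 1900

def Spec_count_10_friendly (num : Int) (out : Int) : Prop := out = count_10_friendly_alt num
instance (num : Int) (out : Int) : Decidable (Spec_count_10_friendly num out) := by unfold Spec_count_10_friendly; infer_instance

-- ===== CLAIM (what is proved, stated in full; the proofs are below) =====
def Claim_equal_count_10_friendly : Prop := ∀ (num : Int), Dom_count_10_friendly num → Pre_count_10_friendly num → Spec_count_10_friendly num (count_10_friendly num)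

-- ===== LEMMAS AND PROOFS =====

-- The common mathematical value: the pure digit DP on the remaining characters.
def fpure : List Char → Int → Bool → Bool → Int
  | [], _, _, v => if v then 1 else 0
  | ch :: rest, s, t, v =>
    let limit := if t then convDigit ch else 9
    (PySem.List.pyRange 0 (limit + 1) 1).foldl
      (fun c dig =>
        let ns := (s + dig) % 10
        let nv := v || (decide (ns = 0) && decide (¬ s = 0))
        (c + fpure rest ns (t && decide (dig = limit)) nv) % pvMOD) 0

-- Memo-dict invariant for A: every stored entry is the pure value of the
-- corresponding suffix.
def InvA (full : List Char) (dp : PySem.Dict (Int × Int × Bool × Bool) Int) : Prop :=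
  ∀ (p s : Int) (t v : Bool) (c : Int), dp.get? (p, s, t, v) = some c →
    ∃ m : Nat, p = (m : Int) ∧ c = fpure (full.drop m) s t v

theorem invA_empty (full : List Char) : InvA full PySem.Dict.empty := by
  intro p s t v c h
  simp [PySem.Dict.get?_empty] at h

theorem dfsA_correct (full : List Char) :
    ∀ (rest : List Char) (m : Nat) (s : Int) (t v : Bool)
      (dp : PySem.Dict (Int × Int × Bool × Bool) Int),
      rest = full.drop m → InvA full dp →
      (dfsA rest (m : Int) s t v dp).1 = fpure rest s t v ∧
        InvA full (dfsA rest (m : Int) s t v dp).2 := by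
  intro rest
  induction rest with
  | nil =>
    intro m s t v dp hrest hinv
    exact ⟨rfl, hinv⟩
  | cons ch rest ih =>
    intro m s t v dp hrest hinv
    have hdrop : full.drop (m + 1) = rest := by
      have : full.drop (m + 1) = (full.drop m).drop 1 := by
        rw [List.drop_drop]
      rw [this, ← hrest]
      rfl
    cases hget : dp.get? ((m : Int), s, t, v) with
    | some c =>
      have := hinv _ _ _ _ _ hget
      obtain ⟨m', hm', hc⟩ := this
      have hmm : m = m' := by exact_mod_cast hm'
      subst hmm
      rw [← hrest] at hc
      constructor
      · simp only [dfsA, hget]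
        exact hc
      · simp only [dfsA, hget]
        exact hinv
    | none =>
      -- the digit loop: the accumulated pair tracks fpure and keeps the memo invariant
      have fold :
          ∀ (digs : List Int) (acc : Int)
            (dp' : PySem.Dict (Int × Int × Bool × Bool) Int), InvA full dp' →
            (digs.foldl
              (fun (acc : Int × PySem.Dict (Int × Int × Bool × Bool) Int) dig =>
                let ns := (s + dig) % 10
                let nv := v || (decide (ns = 0) && decide (¬ s = 0))
                let res := dfsA rest ((m : Int) + 1) ns
                  (t && decide (dig = (if t then convDigit ch else 9))) nv acc.2
                ((acc.1 + res.1) % pvMOD, res.2)) (acc, dp')).1 =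
              digs.foldl
                (fun c dig =>
                  let ns := (s + dig) % 10
                  let nv := v || (decide (ns = 0) && decide (¬ s = 0))
                  (c + fpure rest ns (t && decide (dig = (if t then convDigit ch else 9))) nv) % pvMOD) acc ∧
            InvA full (digs.foldl
              (fun (acc : Int × PySem.Dict (Int × Int × Bool × Bool) Int) dig =>
                let ns := (s + dig) % 10
                let nv := v || (decide (ns = 0) && decide (¬ s = 0))
                let res := dfsA rest ((m : Int) + 1) ns
                  (t && decide (dig = (if t then convDigit ch else 9))) nv acc.2
                ((acc.1 + res.1) % pvMOD, res.2)) (acc, dp')).2 := by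
        intro digs
        induction digs with
        | nil => intro acc dp' h; exact ⟨rfl, h⟩
        | cons dig digs ihd =>
          intro acc dp' h
          have hcast : ((m : Int) + 1) = ((m + 1 : Nat) : Int) := by push_cast; ring
          have hrec := ih (m + 1) ((s + dig) % 10)
            (t && decide (dig = (if t then convDigit ch else 9)))
            (v || (decide ((s + dig) % 10 = 0) && decide (¬ s = 0))) dp' hdrop.symm h
          rw [← hcast] at hrec
          simp only [List.foldl_cons]
          have h2 := ihd ((acc + (dfsA rest ((m : Int) + 1) ((s + dig) % 10)
            (t && decide (dig = (if t then convDigit ch else 9)))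
            (v || (decide ((s + dig) % 10 = 0) && decide (¬ s = 0))) dp').1) % pvMOD)
            ((dfsA rest ((m : Int) + 1) ((s + dig) % 10)
              (t && decide (dig = (if t then convDigit ch else 9)))
              (v || (decide ((s + dig) % 10 = 0) && decide (¬ s = 0))) dp').2) hrec.2
          refine ⟨?_, h2.2⟩
          rw [h2.1, hrec.1]
      have hmain := fold (PySem.List.pyRange 0 ((if t then convDigit ch else 9) + 1) 1) 0 dp hinv
      constructor
      · simp only [dfsA, hget]
        exact hmain.1.trans (by rw [fpure])
      · simp only [dfsA, hget]
        intro p' s' t' v' c' hc'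
        rw [PySem.Dict.get?_insert] at hc'
        by_cases hk : ((p', s', t', v') : Int × Int × Bool × Bool) = ((m : Int), s, t, v)
        · rw [if_pos hk] at hc'
          simp only [Prod.ext_iff] at hk
          obtain ⟨hp, hs, ht, hv2⟩ := hk
          subst hs; subst ht; subst hv2
          refine ⟨m, hp, ?_⟩
          injection hc' with hc''
          rw [← hc'', hmain.1, ← hrest]
          rfl
        · rw [if_neg hk] at hc'
          exact hmain.2 _ _ _ _ _ hc'

theorem countA_eq_fpure (num : Int) :
    count_10_friendly num = fpure (PySem.Int.toStr num).toList 0 true false := by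
  have h := dfsA_correct (PySem.Int.toStr num).toList (PySem.Int.toStr num).toList
    0 0 true false PySem.Dict.empty (by simp) (invA_empty _)
  simpa [count_10_friendly] using h.1

-- B side: where a lookup into bTable F lands
theorem bTable_get? (F : Int → Bool → Bool → Int) (s : Int) (t v : Bool) :
    (bTable F).get? (s, t, v) =
      if 0 ≤ s ∧ s < 10 then some (F s t v) else none := by
  have key : ∀ (ks : List Int) (nt0 : PySem.Dict (Int × Bool × Bool) Int),
      (ks.foldl (fun nt s' =>
        [false, true].foldl (fun nt t' =>
          [false, true].foldl (fun nt v' =>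
            nt.insert (s', t', v') (F s' t' v')) nt) nt) nt0).get? (s, t, v)
      = if s ∈ ks then some (F s t v) else nt0.get? (s, t, v) := by
    intro ks
    induction ks with
    | nil => intro nt0; simp
    | cons k ks ihk =>
      intro nt0
      rw [List.foldl_cons, ihk]
      by_cases hmem : s ∈ ks
      · simp [List.mem_cons, hmem]
      · rw [if_neg hmem]
        simp only [List.mem_cons, hmem, or_false]
        by_cases hk : s = k
        · subst hk
          rw [if_pos rfl]
          simp only [List.foldl_cons, List.foldl_nil, PySem.Dict.get?_insert, Prod.ext_iff]
          cases t <;> cases v <;> simp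
        · rw [if_neg hk]
          simp only [List.foldl_cons, List.foldl_nil]
          simp [PySem.Dict.get?_insert, Prod.ext_iff, hk]
  unfold bTable
  rw [key]
  simp [PySem.List.mem_pyRange_one, PySem.Dict.get?_empty]

theorem invB_step (ch : Char) (chs : List Char)
    (tb : PySem.Dict (Int × Bool × Bool) Int)
    (htb : ∀ (s : Int) (t v : Bool), 0 ≤ s → s < 10 →
      tb.get? (s, t, v) = some (fpure chs s t v)) :
    ∀ (s : Int) (t v : Bool), 0 ≤ s → s < 10 →
      (bTable (fun s t v => bVal (convDigit ch) tb s t v)).get? (s, t, v)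
        = some (fpure (ch :: chs) s t v) := by
  intro s t v h0 h1
  rw [bTable_get?, if_pos ⟨h0, h1⟩]
  congr 1
  have hgetD : ∀ (dig : Int) (t' v' : Bool),
      tb.getD ((s + dig) % 10, t', v') 0 = fpure chs ((s + dig) % 10) t' v' := by
    intro dig t' v'
    rw [PySem.Dict.getD_eq_get?_getD,
      htb _ t' v' (Int.emod_nonneg _ (by norm_num)) (Int.emod_lt_of_pos _ (by norm_num))]
    rfl
  show bVal (convDigit ch) tb s t v = fpure (ch :: chs) s t v
  simp only [bVal, fpure]
  congr 1
  funext c dig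
  rw [hgetD]

theorem invB_all (chs : List Char) :
    ∀ (s : Int) (t v : Bool), 0 ≤ s → s < 10 →
      (chs.foldr (fun c tb => bTable (fun s t v => bVal (convDigit c) tb s t v))
          (bTable (fun _ _ v => if v then 1 else 0))).get? (s, t, v)
        = some (fpure chs s t v) := by
  induction chs with
  | nil =>
    intro s t v h0 h1
    rw [List.foldr_nil, bTable_get?, if_pos ⟨h0, h1⟩]
    rfl
  | cons ch chs ih =>
    intro s t v h0 h1
    rw [List.foldr_cons]
    exact invB_step ch chs _ ih s t v h0 h1

theorem countB_eq_fpure (num : Int) :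
    count_10_friendly_alt num = fpure (PySem.Int.toStr num).toList 0 true false := by
  show ((((PySem.Int.toStr num).toList.map convDigit).reverse.foldl
      (fun tb d => bTable (fun s t v => bVal d tb s t v))
      (bTable (fun _ _ v => if v then 1 else 0))).getD (0, true, false) 0) = _
  rw [← List.map_reverse, List.foldl_map, List.foldl_reverse]
  rw [PySem.Dict.getD_eq_get?_getD,
    invB_all (PySem.Int.toStr num).toList 0 true false (le_refl 0) (by norm_num)]
  rfl

-- ===== VERDICT (by name: the statement is the Claim_ definition above) =====
theorem count_10_friendly_spec : Claim_equal_count_10_friendly := by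
  intro num _ _
  unfold Spec_count_10_friendly
  rw [countA_eq_fpure, countB_eq_fpure]
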